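-- pv_equiv track=rewrite | github.com/vfhernandes/automea_test | automea_test/__init__.py | _convert_binary_reverb_to_timestamp
-- ===== SOURCE A (Python) =====
-- def _convert_binary_reverb_to_timestamp(input_binary):
--     """
--     Convert binary representation of reverbs to timestamps.
--
--     This method converts a binary representation of reverbs to timestamps.
--
--     Parameters
--     ----------
--     input_binary : array_like
--         The binary representation of reverbs.
--
--     Returns
--     -------
--     list
--         List of timestamp ranges corresponding to reverbs.
--
--     Examples
--     --------
--     >>> obj = Analysis()
--     >>> reverb_timestamps = obj._convert_binary_reverb_to_timestamp(reverb_binary)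
--
--     Notes
--     -----
--     - This method converts a binary representation of reverbs to a list of timestamp ranges.
--     - Consecutive 1s in the binary array represent timestamp ranges for reverberations.
--     """
--
--     start_reverb = False
--     reverbs_ = []
--     for i, item in enumerate(input_binary):
--         if item == 1 and not start_reverb:
--             reverbs_.append([i])
--             start_reverb = True
--         elif item == 0 and start_reverb:
--             reverbs_[-1].append(i-1)
--             start_reverb = False
--     return reverbs_
-- ===== SOURCE B (Python) =====
-- def _convert_binary_reverb_to_timestamp(input_binary):
--     # Pass 1: in-reverb state at each index (1 turns on, 0 turns off, other values carry).
--     states = []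
--     prev = False
--     for x in input_binary:
--         if x == 1:
--             prev = True
--         elif x == 0:
--             prev = False
--         states.append(prev)
--     # Pass 2: rising edges give starts, falling edges give ends (i-1).
--     starts = []
--     ends = []
--     prev = False
--     for i, st in enumerate(states):
--         if st and not prev:
--             starts.append(i)
--         if prev and not st:
--             ends.append(i - 1)
--         prev = st
--     # Pair starts with ends in order; a trailing open run stays as [start].
--     return [[s, ends[j]] if j < len(ends) else [s]
--             for j, s in enumerate(starts)]
-- ===== Notes on version B (the rewrite author's own statement) =====
-- stated objective: alternative
-- what changed: Replaces A's single stateful loop that appends [i] and mutates the last sublist with a three-stage edge-detection pipeline: a pass computing the in-reverb state per index, a pass collecting rising-edge starts and falling-edge ends, and a final pairing of starts with ends (a trailing open run stays as a one-element range).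
import Mathlib
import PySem

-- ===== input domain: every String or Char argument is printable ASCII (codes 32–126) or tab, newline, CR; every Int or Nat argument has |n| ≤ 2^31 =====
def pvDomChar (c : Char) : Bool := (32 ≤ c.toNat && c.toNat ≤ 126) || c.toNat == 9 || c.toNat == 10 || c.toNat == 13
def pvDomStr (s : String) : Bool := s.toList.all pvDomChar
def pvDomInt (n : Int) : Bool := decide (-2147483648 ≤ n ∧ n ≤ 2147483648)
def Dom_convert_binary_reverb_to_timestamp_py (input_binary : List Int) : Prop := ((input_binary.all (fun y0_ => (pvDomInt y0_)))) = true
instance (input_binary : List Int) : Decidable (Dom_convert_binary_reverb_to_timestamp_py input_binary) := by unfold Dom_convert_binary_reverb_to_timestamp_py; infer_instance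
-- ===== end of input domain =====

-- B replaces A's single stateful append-to-last loop by an edge-detection pipeline
-- (state list, then rising/falling edge indices, then pairing); alternative decomposition, same O(n) cost.

-- ===== PORT A =====
-- reverbs_[-1].append(e): append e to the last sublist (only reached with a nonempty list)
def pvAppendLast (rs : List (List Int)) (e : Int) : List (List Int) :=
  match rs with
  | [] => []
  | [r] => [r ++ [e]]
  | r :: rest => r :: pvAppendLast rest e

-- the body of A's for-loop over enumerate(input_binary)
def pvStepA (st : Bool × List (List Int)) (p : Int × Int) : Bool × List (List Int) :=
  if p.2 = 1 ∧ st.1 = false then (true, st.2 ++ [[p.1]])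
  else if p.2 = 0 ∧ st.1 = true then (false, pvAppendLast st.2 (p.1 - 1))
  else st

def convert_binary_reverb_to_timestamp_py (input_binary : List Int) : List (List Int) :=
  ((PySem.List.enumerate input_binary 0).foldl pvStepA (false, [])).2

-- ===== PORT B =====
-- pass 1 body: in-reverb state at each index (1 on, 0 off, otherwise carry)
def pvStepS (st : Bool × List Bool) (x : Int) : Bool × List Bool :=
  let p := if x = 1 then true else if x = 0 then false else st.1
  (p, st.2 ++ [p])

-- pass 2 body: rising edges → starts, falling edges → ends
def pvStepB (st : Bool × List Int × List Int) (p : Int × Bool) : Bool × List Int × List Int :=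
  let starts := if p.2 = true ∧ st.1 = false then st.2.1 ++ [p.1] else st.2.1
  let ends := if st.1 = true ∧ p.2 = false then st.2.2 ++ [p.1 - 1] else st.2.2
  (p.2, starts, ends)

def convert_binary_reverb_to_timestamp_py_alt (input_binary : List Int) : List (List Int) :=
  let states := (input_binary.foldl pvStepS (false, [])).2
  let se := (PySem.List.enumerate states 0).foldl pvStepB (false, [], [])
  let starts := se.2.1
  let ends := se.2.2
  (PySem.List.enumerate starts 0).map
    (fun p => if p.1 < PySem.List.len ends then [p.2, PySem.List.pyGetD ends p.1 0] else [p.2])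

-- ===== PRECONDITION & SPEC =====
def Spec_convert_binary_reverb_to_timestamp_py (input_binary : List Int) (out : List (List Int)) : Prop := out = convert_binary_reverb_to_timestamp_py_alt input_binary
instance (input_binary : List Int) (out : List (List Int)) : Decidable (Spec_convert_binary_reverb_to_timestamp_py input_binary out) := by unfold Spec_convert_binary_reverb_to_timestamp_py; infer_instance

-- ===== CLAIM (what is proved, stated in full; the proofs are below) =====
def Claim_equal_convert_binary_reverb_to_timestamp_py : Prop := ∀ (input_binary : List Int), Dom_convert_binary_reverb_to_timestamp_py input_binary → Spec_convert_binary_reverb_to_timestamp_py input_binary (convert_binary_reverb_to_timestamp_py input_binary)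

-- ===== LEMMAS AND PROOFS =====

-- next in-reverb state after reading x in state s
def pvNext (x : Int) (s : Bool) : Bool := if x = 1 then true else if x = 0 then false else s

-- canonical run decomposition from index i in state s:
-- .1 = end of the pending run (if s and it falls), .2 = (start, optional end) of later runs
def pvG : List Int → Int → Bool → Option Int × List (Int × Option Int)
  | [], _, _ => (none, [])
  | x :: t, i, s =>
    let s' := pvNext x s
    if s = false ∧ s' = true then
      (none, (i, (pvG t (i+1) true).1) :: (pvG t (i+1) true).2)
    else if s = true ∧ s' = false then
      (some (i-1), (pvG t (i+1) false).2)
    else pvG t (i+1) s'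

def pvRender (p : Int × Option Int) : List Int :=
  match p.2 with
  | none => [p.1]
  | some e => [p.1, e]

def pvGlue (s : Bool) (acc : List (List Int)) (e? : Option Int) : List (List Int) :=
  match s, e? with
  | true, some e => pvAppendLast acc e
  | _, _ => acc

def pvStates : List Int → Bool → List Bool
  | [], _ => []
  | x :: t, s => pvNext x s :: pvStates t (pvNext x s)

-- only the last run may be open
def pvOk : List (Int × Option Int) → Prop
  | [] => True
  | (_, none) :: rs => rs = []
  | (_, some _) :: rs => pvOk rs

lemma pvG_false_fst : ∀ (l : List Int) (i : Int), (pvG l i false).1 = none := by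
  intro l
  induction l with
  | nil => intro i; rfl
  | cons x t ih =>
    intro i
    by_cases h : pvNext x false = true
    · simp [pvG, h]
    · simp [pvG, h]; exact ih (i+1)

lemma pvG_true_none : ∀ (l : List Int) (i : Int),
    (pvG l i true).1 = none → (pvG l i true).2 = [] := by
  intro l
  induction l with
  | nil => intro i _; rfl
  | cons x t ih =>
    intro i h
    by_cases hs : pvNext x true = false
    · simp [pvG, hs] at h
    · simp [pvG, hs] at h ⊢; exact ih (i+1) h

lemma pvAppendLast_concat (ys : List (List Int)) (y : List Int) (e : Int) :
    pvAppendLast (ys ++ [y]) e = ys ++ [y ++ [e]] := by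
  induction ys with
  | nil => rfl
  | cons a t ih =>
    cases t with
    | nil => simp [pvAppendLast]
    | cons b t' => simpa [pvAppendLast] using ih

lemma A_loop : ∀ (l : List Int) (i : Int) (s : Bool) (acc : List (List Int)),
    ((PySem.List.enumerate l i).foldl pvStepA (s, acc)).2 =
      pvGlue s acc (pvG l i s).1 ++ (pvG l i s).2.map pvRender := by
  intro l
  induction l with
  | nil =>
    intro i s acc
    cases s <;> simp [PySem.List.enumerate_nil, pvG, pvGlue]
  | cons x t ih =>
    intro i s acc
    rw [PySem.List.enumerate_cons]
    simp only [List.foldl_cons]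
    cases s with
    | false =>
      by_cases h1 : x = 1
      · -- rising edge
        have hstep : pvStepA (false, acc) (i, x) = (true, acc ++ [[i]]) := by
          simp [pvStepA, h1]
        rw [hstep, ih]
        have hnext : pvNext x false = true := by simp [pvNext, h1]
        simp only [pvG, hnext]
        simp only [pvGlue]
        cases he : (pvG t (i+1) true).1 with
        | none => simp [pvRender]
        | some e => simp [pvRender, pvAppendLast_concat]
      · -- no edge, state stays false
        have hnext : pvNext x false = false := by simp [pvNext, h1]
        have hstep : pvStepA (false, acc) (i, x) = (false, acc) := by
          simp [pvStepA, h1]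
        rw [hstep, ih]
        simp [pvG, hnext]
    | true =>
      by_cases h0 : x = 0
      · -- falling edge
        have hstep : pvStepA (true, acc) (i, x) = (false, pvAppendLast acc (i - 1)) := by
          simp [pvStepA, h0]
        rw [hstep, ih]
        have hnext : pvNext x true = false := by simp [pvNext, h0]
        simp [pvG, hnext, pvGlue]
      · -- no edge, state stays true
        have hnext : pvNext x true = true := by simp [pvNext, h0]
        have hstep : pvStepA (true, acc) (i, x) = (true, acc) := by
          simp [pvStepA, h0]
        rw [hstep, ih]
        simp [pvG, hnext]

lemma states_loop : ∀ (l : List Int) (s : Bool) (acc : List Bool),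
    (l.foldl pvStepS (s, acc)).2 = acc ++ pvStates l s := by
  intro l
  induction l with
  | nil => intro s acc; simp [pvStates]
  | cons x t ih =>
    intro s acc
    simp only [List.foldl_cons]
    have hstep : pvStepS (s, acc) x = (pvNext x s, acc ++ [pvNext x s]) := by
      simp [pvStepS, pvNext]
    rw [hstep, ih]
    simp [pvStates]

lemma B_loop : ∀ (l : List Int) (i : Int) (s : Bool) (starts ends : List Int),
    ((PySem.List.enumerate (pvStates l s) i).foldl pvStepB (s, starts, ends)).2 =
      (starts ++ (pvG l i s).2.map (·.1),
       ends ++ (pvG l i s).1.toList ++ (pvG l i s).2.filterMap (·.2)) := by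
  intro l
  induction l with
  | nil =>
    intro i s starts ends
    simp [pvStates, PySem.List.enumerate_nil, pvG]
  | cons x t ih =>
    intro i s starts ends
    simp only [pvStates, PySem.List.enumerate_cons, List.foldl_cons]
    cases s with
    | false =>
      cases hnext : pvNext x false with
      | true =>
        have hstep : pvStepB (false, starts, ends) (i, true) = (true, starts ++ [i], ends) := by
          simp [pvStepB]
        rw [hstep, ih]
        simp only [pvG, hnext]
        cases (pvG t (i+1) true).1 <;> simp
      | false =>
        have hstep : pvStepB (false, starts, ends) (i, false) = (false, starts, ends) := by
          simp [pvStepB]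
        rw [hstep, ih]
        simp [pvG, hnext]
    | true =>
      cases hnext : pvNext x true with
      | false =>
        have hstep : pvStepB (true, starts, ends) (i, false) = (false, starts, ends ++ [i - 1]) := by
          simp [pvStepB]
        rw [hstep, ih]
        simp [pvG, hnext, pvG_false_fst]
      | true =>
        have hstep : pvStepB (true, starts, ends) (i, true) = (true, starts, ends) := by
          simp [pvStepB]
        rw [hstep, ih]
        simp [pvG, hnext]

lemma pvG_ok : ∀ (l : List Int) (i : Int) (s : Bool), pvOk (pvG l i s).2 := by
  intro l
  induction l with
  | nil => intro i s; trivial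
  | cons x t ih =>
    intro i s
    cases s with
    | false =>
      cases hnext : pvNext x false with
      | true =>
        simp only [pvG, hnext]
        cases he : (pvG t (i+1) true).1 with
        | none => simpa [pvOk] using pvG_true_none t (i+1) he
        | some e => simpa [pvOk] using ih (i+1) true
      | false =>
        simp only [pvG, hnext]
        exact ih (i+1) false
    | true =>
      cases hnext : pvNext x true with
      | false =>
        simp only [pvG, hnext]
        exact ih (i+1) false
      | true =>
        simp only [pvG, hnext]
        exact ih (i+1) true

lemma pairing : ∀ (rs : List (Int × Option Int)) (E pre : List Int),
    pvOk rs → E = pre ++ rs.filterMap (·.2) →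
    (PySem.List.enumerate (rs.map (·.1)) (pre.length : Int)).map
      (fun p => if p.1 < PySem.List.len E then [p.2, PySem.List.pyGetD E p.1 0] else [p.2]) =
    rs.map pvRender := by
  intro rs
  induction rs with
  | nil => intro E pre _ _; simp [PySem.List.enumerate_nil]
  | cons hd tl ih =>
    intro E pre hok hE
    obtain ⟨a, e?⟩ := hd
    cases e? with
    | none =>
      have htl : tl = [] := hok
      subst htl
      simp only [List.filterMap] at hE
      simp [PySem.List.enumerate_cons, PySem.List.enumerate_nil, hE, PySem.List.len, pvRender]
    | some e =>
      have hok' : pvOk tl := hok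
      have hE' : E = (pre ++ [e]) ++ tl.filterMap (·.2) := by
        simp [hE, List.filterMap]
      simp only [List.map_cons, PySem.List.enumerate_cons, List.map]
      have hlt : (pre.length : Int) < PySem.List.len E := by
        rw [hE']
        simp [PySem.List.len]
      have hget : PySem.List.pyGetD E (pre.length : Int) 0 = e := by
        rw [PySem.List.pyGetD_natCast, hE']
        rw [List.append_assoc]
        simp
      have htail :
          (PySem.List.enumerate (tl.map (·.1)) ((pre.length : Int) + 1)).map
            (fun p => if p.1 < PySem.List.len E then [p.2, PySem.List.pyGetD E p.1 0] else [p.2]) =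
          tl.map pvRender := by
        have hcast : (pre.length : Int) + 1 = (((pre ++ [e]).length : Nat) : Int) := by
          simp
        rw [hcast]
        exact ih E (pre ++ [e]) hok' hE'
      rw [if_pos hlt, hget, htail]
      rfl

-- ===== VERDICT (by name: the statement is the Claim_ definition above) =====
theorem convert_binary_reverb_to_timestamp_py_spec : Claim_equal_convert_binary_reverb_to_timestamp_py := by
  intro l _
  unfold Spec_convert_binary_reverb_to_timestamp_py
  unfold convert_binary_reverb_to_timestamp_py convert_binary_reverb_to_timestamp_py_alt
  rw [A_loop]
  rw [states_loop]
  simp only [List.nil_append]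
  rw [B_loop]
  have h0 : (pvG l 0 false).1 = none := pvG_false_fst l 0
  simp only [h0, Option.toList, List.nil_append, List.append_nil, pvGlue]
  have := pairing (pvG l 0 false).2 ((pvG l 0 false).2.filterMap (·.2)) [] (pvG_ok l 0 false) (by simp)
  simpa using this.symm
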